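-- pv_equiv track=rewrite | github.com/gatorbacon/wrestledata-simple | scripts/rankings/tournament_ranked_rosters.py | search_teams
-- ===== SOURCE A (Python) =====
-- from typing import Dict, List, Optional
--
-- def search_teams(teams: List[Dict], query: str) -> List[str]:
--     """Return sorted list of team_name values containing the query."""
--     query_lower = query.lower()
--     names = set()
--     for team in teams:
--         name = team.get("team_name", "Unknown")
--         if query_lower in name.lower():
--             names.add(name)
--     return sorted(names)
-- ===== SOURCE B (Python) =====
-- def search_teams(teams, query):
--     """Return sorted list of team_name values containing the query.
--
--     Single pass: each matching name is inserted at its sorted position in the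
--     result (skipped if already present), so the result is always sorted and
--     duplicate-free -- no sort call and no set needed."""
--     q = query.lower()
--     result = []
--     for team in teams:
--         name = team.get("team_name", "Unknown")
--         if q in name.lower():
--             i = 0
--             while i < len(result) and result[i] < name:
--                 i += 1
--             if i == len(result) or result[i] != name:
--                 result.insert(i, name)
--     return result
-- ===== Notes on version B (the rewrite author's own statement) =====
-- stated objective: alternative
-- what changed: Replaces filter-into-set followed by a sort with a single online pass that keeps the result sorted and duplicate-free at all times, inserting each matching name at its ordered position (insertion-sort-with-dedup); no set and no sort call.
import Mathlib
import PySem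

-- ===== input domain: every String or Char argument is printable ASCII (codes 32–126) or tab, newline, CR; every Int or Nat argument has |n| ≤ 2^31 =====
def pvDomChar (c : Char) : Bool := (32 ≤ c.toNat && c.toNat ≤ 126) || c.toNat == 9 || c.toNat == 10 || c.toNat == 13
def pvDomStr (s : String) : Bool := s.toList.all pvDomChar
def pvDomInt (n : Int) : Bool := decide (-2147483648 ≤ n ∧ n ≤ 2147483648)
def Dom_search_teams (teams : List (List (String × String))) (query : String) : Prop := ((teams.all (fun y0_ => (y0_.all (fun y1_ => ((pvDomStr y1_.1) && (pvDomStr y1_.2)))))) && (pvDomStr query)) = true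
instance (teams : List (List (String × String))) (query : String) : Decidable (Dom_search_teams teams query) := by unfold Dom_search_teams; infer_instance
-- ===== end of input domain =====

-- B replaces A's filter-into-set-then-sort by one online pass that keeps the result sorted and
-- duplicate-free throughout, inserting each match at its ordered position (alternative algorithm).
-- team.get("team_name", "Unknown") is ported as first-match association-list lookup (List.lookup), exact for dict inputs (unique keys).

-- ===== PORT A =====
def search_teams (teams : List (List (String × String))) (query : String) : List String :=
  let query_lower := PySem.Str.lower query
  let names : PySem.Set String := teams.foldl (fun names team =>
    let name := (List.lookup "team_name" team).getD "Unknown"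
    if PySem.Str.isIn query_lower (PySem.Str.lower name) then PySem.Set.add names name else names)
    PySem.Set.empty
  PySem.List.sorted names (fun x => x) false

-- ===== PORT B =====
-- B's inner while-loop + conditional insert: walk past the elements < name, then insert name
-- unless the element reached equals it (keeps the accumulator sorted and duplicate-free).
def insUnique (name : String) : List String → List String
  | [] => [name]
  | x :: t =>
      if x < name then x :: insUnique name t
      else if x = name then x :: t
      else name :: x :: t

def search_teams_alt (teams : List (List (String × String))) (query : String) : List String :=
  let q := PySem.Str.lower query
  teams.foldl (fun result team =>
    let name := (List.lookup "team_name" team).getD "Unknown"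
    if PySem.Str.isIn q (PySem.Str.lower name) then insUnique name result else result) []

-- ===== PRECONDITION & SPEC =====
def Spec_search_teams (teams : List (List (String × String))) (query : String) (out : List String) : Prop := out = search_teams_alt teams query
instance (teams : List (List (String × String))) (query : String) (out : List String) : Decidable (Spec_search_teams teams query out) := by unfold Spec_search_teams; infer_instance

-- ===== CLAIM (what is proved, stated in full; the proofs are below) =====
def Claim_equal_search_teams : Prop := ∀ (teams : List (List (String × String))) (query : String), Dom_search_teams teams query → Spec_search_teams teams query (search_teams teams query)

-- ===== LEMMAS AND PROOFS =====

theorem mem_insUnique (n a : String) : ∀ l : List String, a ∈ insUnique n l ↔ a = n ∨ a ∈ l := by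
  intro l
  induction l with
  | nil => simp [insUnique]
  | cons x t ih =>
      simp only [insUnique]
      split_ifs with h1 h2
      · simp only [List.mem_cons, ih]; tauto
      · subst h2; simp [List.mem_cons]
      · simp only [List.mem_cons]

theorem pairwise_insUnique (n : String) :
    ∀ l : List String, l.Pairwise (· < ·) → (insUnique n l).Pairwise (· < ·) := by
  intro l
  induction l with
  | nil => intro _; simp [insUnique]
  | cons x t ih =>
      intro hp
      rcases List.pairwise_cons.1 hp with ⟨hx, ht⟩
      simp only [insUnique]
      split_ifs with h1 h2
      · refine List.pairwise_cons.2 ⟨?_, ih ht⟩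
        intro a ha
        rcases (mem_insUnique n a t).1 ha with rfl | ha'
        · exact h1
        · exact hx a ha'
      · exact hp
      · have hnx : n < x := lt_of_le_of_ne (le_of_not_gt h1) (Ne.symm h2)
        refine List.pairwise_cons.2 ⟨?_, hp⟩
        intro a ha
        rcases List.mem_cons.1 ha with rfl | ha'
        · exact hnx
        · exact lt_trans hnx (hx a ha')

-- the joint loop invariant: B's accumulator stays strictly sorted and has exactly the
-- members of A's set accumulator
theorem fold_invariant (cond : List (String × String) → Bool) (nm : List (String × String) → String) :
    ∀ (teams : List (List (String × String))) (acc : List String) (s : PySem.Set String),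
      acc.Pairwise (· < ·) → (∀ a, a ∈ acc ↔ a ∈ s) →
      (teams.foldl (fun r t => if cond t then insUnique (nm t) r else r) acc).Pairwise (· < ·) ∧
      (∀ a, a ∈ teams.foldl (fun r t => if cond t then insUnique (nm t) r else r) acc ↔
            a ∈ teams.foldl (fun r t => if cond t then PySem.Set.add r (nm t) else r) s) := by
  intro teams
  induction teams with
  | nil => intro acc s hp hm; exact ⟨hp, hm⟩
  | cons t ts ih =>
      intro acc s hp hm
      simp only [List.foldl_cons]
      by_cases h : cond t = true
      · simp only [h, if_true]
        refine ih (insUnique (nm t) acc) (PySem.Set.add s (nm t)) (pairwise_insUnique _ _ hp) ?_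
        intro a
        rw [mem_insUnique, PySem.Set.mem_add, hm]
        tauto
      · simp only [h, Bool.false_eq_true, if_false]
        exact ih acc s hp hm

-- A's set accumulator stays duplicate-free
theorem nodup_fold_set (cond : List (String × String) → Bool) (nm : List (String × String) → String) :
    ∀ (teams : List (List (String × String))) (s : PySem.Set String), s.Nodup →
      (teams.foldl (fun r t => if cond t then PySem.Set.add r (nm t) else r) s).Nodup := by
  intro teams
  induction teams with
  | nil => intro s hs; exact hs
  | cons t ts ih =>
      intro s hs
      simp only [List.foldl_cons]
      by_cases h : cond t = true
      · simp only [h, if_true]; exact ih _ (PySem.Set.nodup_add s (nm t) hs)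
      · simp only [h, Bool.false_eq_true, if_false]; exact ih s hs

-- ===== VERDICT (by name: the statement is the Claim_ definition above) =====
theorem search_teams_spec : Claim_equal_search_teams := by
  intro teams query _
  show PySem.List.sorted
      (teams.foldl (fun names team =>
        if PySem.Str.isIn (PySem.Str.lower query)
            (PySem.Str.lower ((List.lookup "team_name" team).getD "Unknown")) then
          PySem.Set.add names ((List.lookup "team_name" team).getD "Unknown")
        else names) PySem.Set.empty) (fun x => x) false
    = teams.foldl (fun result team =>
        if PySem.Str.isIn (PySem.Str.lower query)
            (PySem.Str.lower ((List.lookup "team_name" team).getD "Unknown")) then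
          insUnique ((List.lookup "team_name" team).getD "Unknown") result
        else result) []
  set cond := fun team : List (String × String) =>
    PySem.Str.isIn (PySem.Str.lower query)
      (PySem.Str.lower ((List.lookup "team_name" team).getD "Unknown")) with hcond
  set nm := fun team : List (String × String) => (List.lookup "team_name" team).getD "Unknown" with hnm
  obtain ⟨hpw, hmem⟩ := fold_invariant cond nm teams [] PySem.Set.empty (by simp) (by simp [PySem.Set.empty])
  have hnd2 := nodup_fold_set cond nm teams PySem.Set.empty (by simp [PySem.Set.empty])
  have hnd1 : (teams.foldl (fun r t => if cond t then insUnique (nm t) r else r) []).Nodup :=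
    hpw.imp (fun h => ne_of_lt h)
  apply PySem.List.sorted_eq_of_perm_of_pairwise_lt
  · exact (List.perm_ext_iff_of_nodup hnd1 hnd2).2 hmem
  · exact hpw
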